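-- pv_equiv track=rewrite | github.com/Matt-Aurora-Ventures/Jarvis | core/system_profiler.py | _parse_vm_stat
-- ===== SOURCE A (Python) =====
-- from typing import Optional
--
-- def _parse_vm_stat(output: str) -> tuple[Optional[float], Optional[float]]:
--     page_size = 4096
--     pages_free = pages_inactive = pages_spec = pages_file_cache = 0
--     for line in output.splitlines():
--         if "page size of" in line:
--             parts = line.split("page size of")
--             if len(parts) > 1:
--                 try:
--                     page_size = int(parts[1].split("bytes")[0].strip())
--                 except ValueError:
--                     pass
--         if line.startswith("Pages free"):
--             pages_free = _extract_pages(line)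
--         elif line.startswith("Pages inactive"):
--             pages_inactive = _extract_pages(line)
--         elif line.startswith("Pages speculative"):
--             pages_spec = _extract_pages(line)
--         elif line.startswith("Pages file-backed"):
--             pages_file_cache = _extract_pages(line)
--
--     free_pages = pages_free + pages_inactive + pages_spec + pages_file_cache
--     return page_size, free_pages
--
-- def _extract_pages(line: str) -> int:
--     try:
--         value = line.split(":")[1].strip().strip(".")
--         return int(value)
--     except Exception as e:
--         return 0
-- ===== SOURCE B (Python) =====
-- _PAGE_LABELS = ("Pages free", "Pages inactive", "Pages speculative", "Pages file-backed")
--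
-- def _try_page_size(line):
--     parts = line.split("page size of")
--     if len(parts) < 2:
--         return None
--     try:
--         return int(parts[1].split("bytes")[0].strip())
--     except ValueError:
--         return None
--
-- def _page_count(line):
--     fields = line.split(":")
--     if len(fields) < 2:
--         return 0
--     try:
--         return int(fields[1].strip().strip("."))
--     except ValueError:
--         return 0
--
-- def _last_count(lines, label):
--     for line in reversed(lines):
--         if line.startswith(label):
--             return _page_count(line)
--     return 0
--
-- def _parse_vm_stat(output):
--     lines = output.splitlines()
--     page_size = next((ps for ps in map(_try_page_size, reversed(lines)) if ps is not None), 4096)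
--     return page_size, sum(_last_count(lines, label) for label in _PAGE_LABELS)
-- ===== Notes on version B (the rewrite author's own statement) =====
-- stated objective: alternative
-- what changed: A's single forward pass that mutates five accumulators per line is replaced by staged backward searches: page size is the first successful parse scanning the lines in reverse, and each of the four counters is obtained by an independent reverse search for the last line with that prefix (last-wins by construction, no loop state).
import Mathlib
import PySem

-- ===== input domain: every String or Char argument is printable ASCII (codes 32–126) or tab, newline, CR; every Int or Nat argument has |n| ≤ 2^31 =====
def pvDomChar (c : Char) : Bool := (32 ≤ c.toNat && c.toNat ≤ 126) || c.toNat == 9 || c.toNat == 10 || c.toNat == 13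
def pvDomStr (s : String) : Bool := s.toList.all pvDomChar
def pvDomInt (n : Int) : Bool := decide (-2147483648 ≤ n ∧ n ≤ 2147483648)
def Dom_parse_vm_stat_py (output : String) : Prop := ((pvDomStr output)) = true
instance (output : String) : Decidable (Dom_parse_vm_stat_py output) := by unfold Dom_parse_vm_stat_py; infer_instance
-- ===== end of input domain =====

-- B replaces A's single forward pass over five mutable accumulators by staged backward
-- searches: first successful page-size parse over the reversed lines, and one independent
-- reverse search per label for the last matching line (objective: alternative).

-- ===== PORT A =====
-- helper _extract_pages: line.split(":")[1].strip().strip("."), int(...), any exception -> 0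
def pvExtractPages (line : List Char) : Int :=
  match PySem.List.pyGet? (PySem.Chars.splitOn line ":".toList) 1 with
  | none => 0            -- IndexError caught
  | some v =>
    match PySem.Int.ofChars? (PySem.Chars.stripChars (PySem.Chars.strip v) ".".toList) with
    | none => 0          -- ValueError caught
    | some n => n

-- the page-size branch of A's loop body (the 'if "page size of" in line:' block)
def pvPageSizeA (line : List Char) (ps : Int) : Int :=
  if PySem.Chars.isIn "page size of".toList line then
    let parts := PySem.Chars.splitOn line "page size of".toList
    if parts.length > 1 then
      match PySem.Int.ofChars? (PySem.Chars.strip ((PySem.Chars.splitOn (parts.getD 1 []) "bytes".toList).getD 0 [])) with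
      | some n => n
      | none => ps       -- ValueError: pass
    else ps
  else ps

-- A's loop body: page-size branch, then the if/elif chain over the four accumulators
def pvStepA (st : Int × Int × Int × Int × Int) (line : List Char) : Int × Int × Int × Int × Int :=
  let ps := pvPageSizeA line st.1
  if PySem.Chars.startswith line "Pages free".toList then
    (ps, pvExtractPages line, st.2.2.1, st.2.2.2.1, st.2.2.2.2)
  else if PySem.Chars.startswith line "Pages inactive".toList then
    (ps, st.2.1, pvExtractPages line, st.2.2.2.1, st.2.2.2.2)
  else if PySem.Chars.startswith line "Pages speculative".toList then
    (ps, st.2.1, st.2.2.1, pvExtractPages line, st.2.2.2.2)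
  else if PySem.Chars.startswith line "Pages file-backed".toList then
    (ps, st.2.1, st.2.2.1, st.2.2.2.1, pvExtractPages line)
  else (ps, st.2.1, st.2.2.1, st.2.2.2.1, st.2.2.2.2)

def parse_vm_stat_py (output : String) : Int × Int :=
  let st := (PySem.Chars.splitlines output.toList).foldl pvStepA (4096, 0, 0, 0, 0)
  (st.1, st.2.1 + st.2.2.1 + st.2.2.2.1 + st.2.2.2.2)

-- ===== PORT B =====
def pvLabels : List (List Char) :=
  ["Pages free".toList, "Pages inactive".toList, "Pages speculative".toList, "Pages file-backed".toList]

-- helper _try_page_size(line): successful parse or None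
def pvTryPageSize (line : List Char) : Option Int :=
  let parts := PySem.Chars.splitOn line "page size of".toList
  if parts.length < 2 then none
  else PySem.Int.ofChars? (PySem.Chars.strip ((PySem.Chars.splitOn (parts.getD 1 []) "bytes".toList).getD 0 []))

-- helper _page_count(line)
def pvPageCount (line : List Char) : Int :=
  let fields := PySem.Chars.splitOn line ":".toList
  if fields.length < 2 then 0
  else
    match PySem.Int.ofChars? (PySem.Chars.stripChars (PySem.Chars.strip (fields.getD 1 [])) ".".toList) with
    | none => 0
    | some n => n

-- helper _last_count(lines, label): first match scanning the reversed list
def pvLastCount (label : List Char) : List (List Char) → Int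
  | [] => 0
  | l :: rest => if PySem.Chars.startswith l label then pvPageCount l else pvLastCount label rest

def parse_vm_stat_py_alt (output : String) : Int × Int :=
  let lines := PySem.Chars.splitlines output.toList
  let page_size := ((lines.reverse).findSome? pvTryPageSize).getD 4096
  (page_size, pvLabels.foldl (fun s lab => s + pvLastCount lab lines.reverse) 0)

-- ===== PRECONDITION & SPEC =====
def Spec_parse_vm_stat_py (output : String) (out : Int × Int) : Prop := out = parse_vm_stat_py_alt output
instance (output : String) (out : Int × Int) : Decidable (Spec_parse_vm_stat_py output out) := by unfold Spec_parse_vm_stat_py; infer_instance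

-- ===== CLAIM (what is proved, stated in full; the proofs are below) =====
def Claim_equal_parse_vm_stat_py : Prop := ∀ (output : String), Dom_parse_vm_stat_py output → Spec_parse_vm_stat_py output (parse_vm_stat_py output)

-- ===== LEMMAS AND PROOFS =====

-- option-producing matcher for one label (proof-side characterisation of B's searches)
def pvMatch (lab l : List Char) : Option Int :=
  if PySem.Chars.startswith l lab then some (pvPageCount l) else none

lemma pvLastCount_eq_findSome (lab : List Char) :
    ∀ xs : List (List Char), pvLastCount lab xs = (xs.findSome? (pvMatch lab)).getD 0 := by
  intro xs
  induction xs with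
  | nil => simp [pvLastCount]
  | cons l rest ih =>
    by_cases h : PySem.Chars.startswith l lab = true <;>
      simp [pvLastCount, pvMatch, List.findSome?, h, ih]

-- generic: a foldl whose projected component is overwritten-or-kept per line equals a
-- first-match search over the reversed lines
lemma pv_foldl_proj {St : Type} (g : St → List Char → St) (proj : St → Int)
    (f : List Char → Option Int)
    (hstep : ∀ st l, proj (g st l) = (f l).getD (proj st)) :
    ∀ (lines : List (List Char)) (st : St),
      proj (lines.foldl g st) = ((lines.reverse).findSome? f).getD (proj st) := by
  intro lines
  induction lines with
  | nil => intro st; simp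
  | cons l ls ih =>
    intro st
    simp only [List.foldl_cons, List.reverse_cons, List.findSome?_append]
    rw [ih]
    cases h : (ls.reverse).findSome? f with
    | some v => simp
    | none => cases hf : f l <;> simp [hf, List.findSome?, hstep]

-- splitOn.go never splits when the separator occurs nowhere in the remaining text
lemma pv_go_len_no_occ (sep : List Char) :
    ∀ (fuel : Nat) (l cur : List Char) (acc : List (List Char)),
      (∀ j, ¬ sep <+: l.drop j) →
      (PySem.Chars.splitOn.go sep fuel l cur acc).length = acc.length + 1 := by
  intro fuel
  induction fuel with
  | zero => intro l cur acc _h; simp [PySem.Chars.splitOn.go]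
  | succ n ih =>
    intro l cur acc h
    cases l with
    | nil => simp [PySem.Chars.splitOn.go]
    | cons c rest =>
      have h0 : sep.isPrefixOf (c :: rest) = false := by
        have hh := h 0
        simp only [List.drop_zero] at hh
        exact Bool.eq_false_iff.mpr (fun hp => hh (List.isPrefixOf_iff_prefix.mp hp))
      rw [show PySem.Chars.splitOn.go sep (n+1) (c :: rest) cur acc
            = PySem.Chars.splitOn.go sep n rest (c :: cur) acc by
        simp [PySem.Chars.splitOn.go, h0]]
      exact ih rest (c :: cur) acc (fun j => by simpa using h (j + 1))

lemma pv_splitOn_len_of_not_isIn (s sep : List Char) (h : PySem.Chars.isIn sep s = false) :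
    (PySem.Chars.splitOn s sep).length = 1 := by
  have hocc : ∀ j, ¬ sep <+: s.drop j := by
    intro j hj
    have ht : PySem.Chars.isIn sep s = true :=
      (PySem.Chars.exists_prefix_drop_iff_isIn sep s).mp ⟨j, hj⟩
    rw [ht] at h; exact Bool.noConfusion h
  unfold PySem.Chars.splitOn
  simpa using pv_go_len_no_occ sep (s.length + 1) s [] [] hocc

-- A's inline page-size update equals first-success semantics of B's helper
lemma pv_pageSize_eq_opt (line : List Char) (ps : Int) :
    pvPageSizeA line ps = (pvTryPageSize line).getD ps := by
  unfold pvPageSizeA pvTryPageSize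
  simp only []
  by_cases hin : PySem.Chars.isIn "page size of".toList line = true
  · rw [if_pos hin]
    by_cases hl : (PySem.Chars.splitOn line "page size of".toList).length < 2
    · rw [if_neg (by omega : ¬ (PySem.Chars.splitOn line "page size of".toList).length > 1), if_pos hl]
      rfl
    · rw [if_pos (by omega : (PySem.Chars.splitOn line "page size of".toList).length > 1), if_neg hl]
      cases PySem.Int.ofChars? (PySem.Chars.strip (((PySem.Chars.splitOn
          ((PySem.Chars.splitOn line "page size of".toList).getD 1 []) "bytes".toList)).getD 0 [])) <;> rfl
  · rw [if_neg hin]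
    have h1 := pv_splitOn_len_of_not_isIn line "page size of".toList (by simpa using hin)
    rw [if_pos (by omega : (PySem.Chars.splitOn line "page size of".toList).length < 2)]
    rfl

-- A's _extract_pages equals B's _page_count
lemma pv_extract_eq (line : List Char) : pvExtractPages line = pvPageCount line := by
  unfold pvExtractPages pvPageCount
  rcases h : PySem.Chars.splitOn line ":".toList with _ | ⟨a, _ | ⟨b, t⟩⟩ <;>
    simp [PySem.List.pyGet?, PySem.List.pyIdx?]

-- no line can start with two distinct labels (no label is a prefix of another)
lemma pv_no_two (l a b : List Char) (hab : ¬ a <+: b) (hba : ¬ b <+: a)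
    (ha : PySem.Chars.startswith l a = true) : PySem.Chars.startswith l b = false := by
  rw [Bool.eq_false_iff]
  intro hb
  rcases List.prefix_or_prefix_of_prefix ((PySem.Chars.startswith_iff l a).mp ha)
      ((PySem.Chars.startswith_iff l b).mp hb) with h | h
  · exact hab h
  · exact hba h

-- step lemmas: each component of A's loop body is overwrite-or-keep w.r.t. its matcher
lemma pv_step_ps (st : Int × Int × Int × Int × Int) (l : List Char) :
    (pvStepA st l).1 = (pvTryPageSize l).getD st.1 := by
  unfold pvStepA; dsimp only
  split_ifs <;> exact pv_pageSize_eq_opt l st.1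

lemma pv_step_free (st : Int × Int × Int × Int × Int) (l : List Char) :
    (pvStepA st l).2.1 = (pvMatch "Pages free".toList l).getD st.2.1 := by
  unfold pvStepA pvMatch; dsimp only
  by_cases s1 : PySem.Chars.startswith l "Pages free".toList = true
  · rw [if_pos s1, if_pos s1, pv_extract_eq]; rfl
  · rw [if_neg s1, if_neg s1]
    split_ifs <;> rfl

lemma pv_step_inactive (st : Int × Int × Int × Int × Int) (l : List Char) :
    (pvStepA st l).2.2.1 = (pvMatch "Pages inactive".toList l).getD st.2.2.1 := by
  unfold pvStepA pvMatch; dsimp only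
  by_cases s1 : PySem.Chars.startswith l "Pages free".toList = true
  · rw [if_pos s1, if_neg (by simpa using pv_no_two l "Pages free".toList "Pages inactive".toList (by decide) (by decide) s1)]; rfl
  · rw [if_neg s1]
    by_cases s2 : PySem.Chars.startswith l "Pages inactive".toList = true
    · rw [if_pos s2, if_pos s2, pv_extract_eq]; rfl
    · rw [if_neg s2, if_neg s2]
      split_ifs <;> rfl

lemma pv_step_spec (st : Int × Int × Int × Int × Int) (l : List Char) :
    (pvStepA st l).2.2.2.1 = (pvMatch "Pages speculative".toList l).getD st.2.2.2.1 := by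
  unfold pvStepA pvMatch; dsimp only
  by_cases s1 : PySem.Chars.startswith l "Pages free".toList = true
  · rw [if_pos s1, if_neg (by simpa using pv_no_two l "Pages free".toList "Pages speculative".toList (by decide) (by decide) s1)]; rfl
  · rw [if_neg s1]
    by_cases s2 : PySem.Chars.startswith l "Pages inactive".toList = true
    · rw [if_pos s2, if_neg (by simpa using pv_no_two l "Pages inactive".toList "Pages speculative".toList (by decide) (by decide) s2)]; rfl
    · rw [if_neg s2]
      by_cases s3 : PySem.Chars.startswith l "Pages speculative".toList = true
      · rw [if_pos s3, if_pos s3, pv_extract_eq]; rfl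
      · rw [if_neg s3, if_neg s3]
        split_ifs <;> rfl

lemma pv_step_file (st : Int × Int × Int × Int × Int) (l : List Char) :
    (pvStepA st l).2.2.2.2 = (pvMatch "Pages file-backed".toList l).getD st.2.2.2.2 := by
  unfold pvStepA pvMatch; dsimp only
  by_cases s1 : PySem.Chars.startswith l "Pages free".toList = true
  · rw [if_pos s1, if_neg (by simpa using pv_no_two l "Pages free".toList "Pages file-backed".toList (by decide) (by decide) s1)]; rfl
  · rw [if_neg s1]
    by_cases s2 : PySem.Chars.startswith l "Pages inactive".toList = true
    · rw [if_pos s2, if_neg (by simpa using pv_no_two l "Pages inactive".toList "Pages file-backed".toList (by decide) (by decide) s2)]; rfl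
    · rw [if_neg s2]
      by_cases s3 : PySem.Chars.startswith l "Pages speculative".toList = true
      · rw [if_pos s3, if_neg (by simpa using pv_no_two l "Pages speculative".toList "Pages file-backed".toList (by decide) (by decide) s3)]; rfl
      · rw [if_neg s3]
        by_cases s4 : PySem.Chars.startswith l "Pages file-backed".toList = true
        · rw [if_pos s4, if_pos s4, pv_extract_eq]; rfl
        · rw [if_neg s4, if_neg s4]; rfl

-- ===== VERDICT (by name: the statement is the Claim_ definition above) =====
theorem parse_vm_stat_py_spec : Claim_equal_parse_vm_stat_py := by
  intro output _hdom
  unfold Spec_parse_vm_stat_py parse_vm_stat_py parse_vm_stat_py_alt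
  dsimp only
  rw [pv_foldl_proj pvStepA (fun st => st.1) pvTryPageSize pv_step_ps,
      pv_foldl_proj pvStepA (fun st => st.2.1) (pvMatch "Pages free".toList) pv_step_free,
      pv_foldl_proj pvStepA (fun st => st.2.2.1) (pvMatch "Pages inactive".toList) pv_step_inactive,
      pv_foldl_proj pvStepA (fun st => st.2.2.2.1) (pvMatch "Pages speculative".toList) pv_step_spec,
      pv_foldl_proj pvStepA (fun st => st.2.2.2.2) (pvMatch "Pages file-backed".toList) pv_step_file]
  simp [pvLabels, pvLastCount_eq_findSome]
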